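-- pv_equiv track=rewrite | github.com/CorwynRavenwing/classes | python/hackerrank/algorithms/count_strings.py | NFA_destination_states
-- ===== SOURCE A (Python) =====
-- def NFA_destination_states(NFA_transitions, fromStates, letter):
--     toStates = [
--         tS
--         for fromState in fromStates
--         for (fS, L, tS) in NFA_transitions
--         if fS == fromState and L == letter
--     ]
--     toStates = tuple(sorted(list(set(toStates))))
--     return toStates
-- ===== SOURCE B (Python) =====
-- def NFA_destination_states(NFA_transitions, fromStates, letter):
--     # One pass: group destination states by (fromState, letter) key,
--     # then a lookup per fromState instead of rescanning all transitions.
--     index = {}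
--     for (fS, L, tS) in NFA_transitions:
--         key = (fS, L)
--         index[key] = index.get(key, []) + [tS]
--     toStates = set()
--     for fromState in fromStates:
--         toStates.update(index.get((fromState, letter), []))
--     return tuple(sorted(toStates))
-- ===== Notes on version B (the rewrite author's own statement) =====
-- stated objective: faster
-- what changed: B builds a dict keyed by (fromState, letter) in one pass over the transitions and then does one lookup per fromState, instead of rescanning the whole transition list for every fromState.
import Mathlib
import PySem

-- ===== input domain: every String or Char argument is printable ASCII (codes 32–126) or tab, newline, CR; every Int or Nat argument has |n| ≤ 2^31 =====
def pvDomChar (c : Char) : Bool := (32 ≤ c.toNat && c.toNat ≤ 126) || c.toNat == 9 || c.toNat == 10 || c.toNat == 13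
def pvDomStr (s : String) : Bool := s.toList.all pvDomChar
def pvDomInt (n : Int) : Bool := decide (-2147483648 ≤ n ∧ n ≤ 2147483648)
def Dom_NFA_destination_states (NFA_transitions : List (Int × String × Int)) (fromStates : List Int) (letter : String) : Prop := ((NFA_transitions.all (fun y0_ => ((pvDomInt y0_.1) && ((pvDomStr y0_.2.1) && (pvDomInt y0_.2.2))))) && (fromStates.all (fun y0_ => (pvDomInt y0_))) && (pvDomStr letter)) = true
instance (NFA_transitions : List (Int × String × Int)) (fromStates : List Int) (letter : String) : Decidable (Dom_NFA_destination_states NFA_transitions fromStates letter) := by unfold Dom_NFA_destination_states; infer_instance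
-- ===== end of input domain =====

-- B replaces A's rescan of the whole transition list per fromState by a dict
-- keyed by (fromState, letter) built in one pass, then one lookup per fromState
-- (objective: faster). Both return the sorted distinct destination states.

-- ===== PORT A =====
-- nested comprehension: for fromState in fromStates, for (fS, L, tS) in NFA_transitions, keep tS on match
def NFA_destination_states (NFA_transitions : List (Int × String × Int)) (fromStates : List Int) (letter : String) : List Int :=
  let toStates : List Int :=
    fromStates.foldl (fun acc fromState =>
      NFA_transitions.foldl (fun acc t =>
        if t.1 == fromState && t.2.1 == letter then acc ++ [t.2.2] else acc) acc) []
  -- tuple(sorted(list(set(toStates)))) — sorted with no key, so set iteration order is irrelevant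
  PySem.List.sorted (PySem.Set.ofList toStates) (fun x => x) false

-- ===== PORT B =====
def NFA_destination_states_alt (NFA_transitions : List (Int × String × Int)) (fromStates : List Int) (letter : String) : List Int :=
  let index : PySem.Dict (Int × String) (List Int) :=
    NFA_transitions.foldl (fun d t => d.modify (t.1, t.2.1) [] (· ++ [t.2.2])) PySem.Dict.empty
  let toStates : PySem.Set Int :=
    fromStates.foldl (fun s fromState => PySem.Set.update s (index.getD (fromState, letter) [])) PySem.Set.empty
  PySem.List.sorted toStates (fun x => x) false

-- ===== PRECONDITION & SPEC =====
def Spec_NFA_destination_states (NFA_transitions : List (Int × String × Int)) (fromStates : List Int) (letter : String) (out : List Int) : Prop := out = NFA_destination_states_alt NFA_transitions fromStates letter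
instance (NFA_transitions : List (Int × String × Int)) (fromStates : List Int) (letter : String) (out : List Int) : Decidable (Spec_NFA_destination_states NFA_transitions fromStates letter out) := by unfold Spec_NFA_destination_states; infer_instance

-- ===== CLAIM (what is proved, stated in full; the proofs are below) =====
def Claim_equal_NFA_destination_states : Prop := ∀ (NFA_transitions : List (Int × String × Int)) (fromStates : List Int) (letter : String), Dom_NFA_destination_states NFA_transitions fromStates letter → Spec_NFA_destination_states NFA_transitions fromStates letter (NFA_destination_states NFA_transitions fromStates letter)

-- ===== LEMMAS AND PROOFS =====

-- B's dict lookup at (fs, letter) is exactly A's inner filtered scan.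
theorem pv_index_getD (NFA_transitions : List (Int × String × Int)) (letter : String) (fs : Int) :
    (NFA_transitions.foldl (fun d t => d.modify (t.1, t.2.1) [] (· ++ [t.2.2]))
      (PySem.Dict.empty : PySem.Dict (Int × String) (List Int))).getD (fs, letter) []
    = (NFA_transitions.filter (fun t => t.1 == fs && t.2.1 == letter)).map (·.2.2) := by
  have h : (NFA_transitions.map (fun t => ((t.1, t.2.1), t.2.2))).foldl
      (fun d (p : (Int × String) × Int) => d.modify p.1 [] (· ++ [p.2]))
      (PySem.Dict.empty : PySem.Dict (Int × String) (List Int))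
      = NFA_transitions.foldl (fun d t => d.modify (t.1, t.2.1) [] (· ++ [t.2.2])) PySem.Dict.empty := by
    rw [List.foldl_map]
  rw [← h, PySem.Dict.getD_foldl_modify_append, List.filter_map, List.map_map]
  simp only [PySem.Dict.getD_empty, List.nil_append, Function.comp_def]
  congr 1

-- A's collected list, as a flatMap of the per-state filtered scans.
theorem pv_A_list (NFA_transitions : List (Int × String × Int)) (fromStates : List Int) (letter : String) :
    fromStates.foldl (fun acc fromState =>
      NFA_transitions.foldl (fun acc t =>
        if t.1 == fromState && t.2.1 == letter then acc ++ [t.2.2] else acc) acc) []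
    = fromStates.flatMap (fun fs => (NFA_transitions.filter (fun t => t.1 == fs && t.2.1 == letter)).map (·.2.2)) := by
  have h : ∀ (acc : List Int) (fs : Int), fs ∈ fromStates →
      NFA_transitions.foldl (fun acc t =>
        if t.1 == fs && t.2.1 == letter then acc ++ [t.2.2] else acc) acc
      = acc ++ (NFA_transitions.filter (fun t => t.1 == fs && t.2.1 == letter)).map (·.2.2) := by
    intro acc fs _
    exact PySem.List.foldl_append_if _ _ _ _
  have h2 := PySem.List.foldl_congr_mem
    (f := fun acc fromState =>
      NFA_transitions.foldl (fun acc t =>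
        if t.1 == fromState && t.2.1 == letter then acc ++ [t.2.2] else acc) acc)
    (g := fun acc fs => acc ++ (NFA_transitions.filter (fun t => t.1 == fs && t.2.1 == letter)).map (·.2.2))
    (init := ([] : List Int)) (l := fromStates) h
  rw [h2, PySem.List.foldl_append_eq_flatMap, List.nil_append]

-- ===== VERDICT (by name: the statement is the Claim_ definition above) =====
theorem NFA_destination_states_spec : Claim_equal_NFA_destination_states := by
  intro NFA_transitions fromStates letter _
  unfold Spec_NFA_destination_states NFA_destination_states NFA_destination_states_alt
  simp only [pv_A_list]
  congr 1
  -- set built from the flatMap = set accumulated per fromState from the dict lookups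
  simp only [PySem.Set.ofList, PySem.Set.update, List.foldl_flatMap]
  apply PySem.List.foldl_congr_mem
  intro s fs _
  rw [pv_index_getD]
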